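-- pv_equiv track=rewrite | github.com/pypi-data/pypi-mirror-140 | packages/spider-auto-parse/spider_auto_parse-1.0.9.tar.gz/spider_auto_parse-1.0.9/auto_parse/gae/schemas/path.py | sort_by_depth
-- ===== SOURCE A (Python) =====
-- from itertools import groupby
-- from operator import itemgetter
--
-- def sort_by_depth(block_list):
--     deep_list = [{'key': k, 'count': k.count('/')} for k in block_list]
--     deep_list.sort(key=itemgetter('count'))
--     result = []
--     for date, items in groupby(deep_list, key=itemgetter('count')):
--         new = []
--         for i in items:
--             new.append(i['key'])
--         result.append(new)
--     return result
-- ===== SOURCE B (Python) =====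
-- def sort_by_depth(block_list):
--     buckets = {}
--     for k in block_list:
--         buckets.setdefault(k.count('/'), []).append(k)
--     return [buckets[c] for c in sorted(buckets)]
-- ===== Notes on version B (the rewrite author's own statement) =====
-- stated objective: faster
-- what changed: B replaces sort-the-whole-list-then-groupby-consecutive-runs with a single dict-bucketing pass keyed by slash count followed by sorting only the distinct counts.
import Mathlib
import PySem

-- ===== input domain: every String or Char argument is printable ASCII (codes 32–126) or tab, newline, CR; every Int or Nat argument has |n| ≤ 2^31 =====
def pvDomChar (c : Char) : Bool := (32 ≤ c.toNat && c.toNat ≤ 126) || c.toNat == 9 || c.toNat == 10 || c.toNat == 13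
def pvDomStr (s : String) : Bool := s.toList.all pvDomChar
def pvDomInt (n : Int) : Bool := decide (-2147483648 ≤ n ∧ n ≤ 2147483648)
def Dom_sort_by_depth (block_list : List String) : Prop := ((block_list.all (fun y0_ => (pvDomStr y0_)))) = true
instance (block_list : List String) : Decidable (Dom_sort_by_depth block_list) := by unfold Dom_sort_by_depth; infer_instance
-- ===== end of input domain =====

-- B buckets keys by slash-count into a dict in one pass and sorts only the distinct counts,
-- instead of sorting the whole list and grouping consecutive runs (objective: faster).


-- ===== PORT A =====
-- helper for itertools.groupby: take the run of leading pairs whose count equals c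
def pvTakeRun (c : Int) : List (String × Int) → List String × List (String × Int)
  | [] => ([], [])
  | (k, c') :: rest =>
    if c' = c then
      let r := pvTakeRun c rest
      (k :: r.1, r.2)
    else ([], (k, c') :: rest)

-- termination measure for pvGroups (the port cites it in decreasing_by)
theorem pvTakeRun_length_le (c : Int) (l : List (String × Int)) :
    (pvTakeRun c l).2.length ≤ l.length := by
  induction l with
  | nil => simp [pvTakeRun]
  | cons p t ih =>
    obtain ⟨k, c'⟩ := p
    by_cases h : c' = c <;> simp [pvTakeRun, h]
    omega

-- the 'for date, items in groupby(...)' loop with its inner 'for i in items' loop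
def pvGroups : List (String × Int) → List (List String)
  | [] => []
  | (k, c) :: rest =>
    let r := pvTakeRun c rest
    (k :: r.1) :: pvGroups r.2
termination_by l => l.length
decreasing_by
  have := pvTakeRun_length_le c rest
  simpa using Nat.lt_succ_of_le this

def sort_by_depth (block_list : List String) : List (List String) :=
  let deep_list := block_list.map (fun k => (k, (PySem.Str.count k "/" : Int)))
  let deep_sorted := PySem.List.sorted deep_list (fun p => p.2)
  pvGroups deep_sorted

-- ===== PORT B =====
-- buckets.setdefault(k.count('/'), []).append(k) in one pass, then [buckets[c] for c in sorted(buckets)]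
-- (buckets[c] is a sure hit — c ranges over the dict's own keys — so it is ported as getD)
def sort_by_depth_alt (block_list : List String) : List (List String) :=
  let buckets := block_list.foldl
    (fun d k => d.modify ((PySem.Str.count k "/" : Int)) [] (fun l => l ++ [k]))
    PySem.Dict.empty
  (PySem.List.sorted buckets.keys (fun c => c)).map (fun c => buckets.getD c [])

-- ===== PRECONDITION & SPEC =====
def Spec_sort_by_depth (block_list : List String) (out : List (List String)) : Prop := out = sort_by_depth_alt block_list
instance (block_list : List String) (out : List (List String)) : Decidable (Spec_sort_by_depth block_list out) := by unfold Spec_sort_by_depth; infer_instance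

-- ===== CLAIM (what is proved, stated in full; the proofs are below) =====
def Claim_equal_sort_by_depth : Prop := ∀ (block_list : List String), Dom_sort_by_depth block_list → Spec_sort_by_depth block_list (sort_by_depth block_list)

-- ===== LEMMAS AND PROOFS =====

-- abbreviation used only in the proofs
def pvCnt (k : String) : Int := (PySem.Str.count k "/" : Int)

-- insertBy goes in front when it beats every element
theorem pv_insertBy_front {α : Type} (before : α → α → Bool) (x : α) (l : List α)
    (h : ∀ y ∈ l, before x y = true) :
    PySem.List.insertBy before x l = x :: l := by
  cases l with
  | nil => rfl
  | cons y t => simp [PySem.List.insertBy, h y (by simp)]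

-- insertBy passes over a prefix it does not beat
theorem pv_insertBy_append {α : Type} (before : α → α → Bool) (x : α) (g t : List α)
    (h : ∀ y ∈ g, before x y = false) :
    PySem.List.insertBy before x (g ++ t) = g ++ PySem.List.insertBy before x t := by
  induction g with
  | nil => rfl
  | cons y g' ih =>
    simp only [List.cons_append, PySem.List.insertBy, h y (by simp)]
    simp only [Bool.false_eq_true, if_false, List.cons.injEq, true_and]
    exact ih (fun z hz => h z (by simp [hz]))

theorem pv_sorted_append_singleton {α κ : Type} [LinearOrder κ] (l : List α) (x : α) (key : α → κ) :
    PySem.List.sorted (l ++ [x]) key =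
      PySem.List.insertBy (fun a b => decide (key a < key b)) x (PySem.List.sorted l key) := by
  rw [PySem.List.sorted_eq_foldl_insertBy, PySem.List.sorted_eq_foldl_insertBy, List.foldl_append]
  rfl

-- flatMap respects pointwise equality on members
theorem pv_flatMap_congr {α β : Type} {l : List α} {f g : α → List β}
    (h : ∀ a ∈ l, f a = g a) : l.flatMap f = l.flatMap g := by
  induction l with
  | nil => rfl
  | cons a t ih =>
    simp only [List.flatMap_cons, h a (by simp)]
    rw [ih (fun x hx => h x (by simp [hx]))]

-- the key insertion lemma: inserting a pair (k, c0) into a flatMap of strictly increasing buckets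
theorem pv_insert_flatMap (k : String) (c0 : Int) (cs : List Int) (G : Int → List (String × Int))
    (hs : cs.Pairwise (· < ·))
    (hG : ∀ c ∈ cs, ∀ p ∈ G c, p.2 = c)
    (hE : c0 ∉ cs → G c0 = []) :
    PySem.List.insertBy (fun a b => decide (a.2 < b.2)) (k, c0) (cs.flatMap G) =
      (if c0 ∈ cs then cs else PySem.List.insertBy (fun a b => decide (a < b)) c0 cs).flatMap
        (fun c => if c = c0 then G c ++ [(k, c0)] else G c) := by
  induction cs with
  | nil =>
    have h0 : G c0 = [] := hE (by simp)
    simp [PySem.List.insertBy, h0]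
  | cons c cs' ih =>
    have hs' : cs'.Pairwise (· < ·) := hs.tail
    have hlt : ∀ c' ∈ cs', c < c' := fun c' h => (List.pairwise_cons.mp hs).1 c' h
    have hthis : ∀ c' ∈ cs', c' < c0 ∨ c0 < c' →
        (if c' = c0 then G c' ++ [(k, c0)] else G c') = G c' := by
      intro c' _ h
      have : c' ≠ c0 := by omega
      simp [this]
    simp only [List.flatMap_cons]
    rcases lt_trichotomy c0 c with hcc | hcc | hcc
    · -- c0 < c : goes in front of everything
      have hnotmem : c0 ∉ c :: cs' := by
        intro h
        rcases List.mem_cons.mp h with h | h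
        · omega
        · have := hlt _ h; omega
      have hall : ∀ y ∈ G c ++ cs'.flatMap G, (fun a b => decide (a.2 < b.2)) (k, c0) y = true := by
        intro y hy
        rcases List.mem_append.mp hy with hy | hy
        · have h1 := hG c (by simp) y hy
          simp [h1]; omega
        · obtain ⟨c', hc', hy'⟩ := List.mem_flatMap.mp hy
          have h1 := hG c' (by simp [hc']) y hy'
          have h2 := hlt c' hc'
          simp [h1]; omega
      rw [pv_insertBy_front _ _ _ hall]
      have hins : PySem.List.insertBy (fun a b => decide (a < b)) c0 (c :: cs') = c0 :: c :: cs' := by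
        simp [PySem.List.insertBy, hcc]
      rw [if_neg hnotmem, hins]
      simp only [List.flatMap_cons, if_pos]
      have hGc : (if c = c0 then G c ++ [(k, c0)] else G c) = G c := by
        have : c ≠ c0 := by omega
        simp [this]
      rw [hE hnotmem,
        pv_flatMap_congr (fun c' h => hthis c' h (Or.inr (lt_trans hcc (hlt c' h)))), hGc]
      simp
    · -- c0 = c : appended at the end of bucket c
      subst hcc
      have hmem : c0 ∈ c0 :: cs' := by simp
      have hGfalse : ∀ y ∈ G c0, (fun a b => decide (a.2 < b.2)) (k, c0) y = false := by
        intro y hy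
        have h1 := hG c0 (by simp) y hy
        simp [h1]
      rw [pv_insertBy_append _ _ _ _ hGfalse]
      have hall : ∀ y ∈ cs'.flatMap G, (fun a b => decide (a.2 < b.2)) (k, c0) y = true := by
        intro y hy
        obtain ⟨c', hc', hy'⟩ := List.mem_flatMap.mp hy
        have h1 := hG c' (by simp [hc']) y hy'
        have h2 := hlt c' hc'
        simp [h1]; omega
      rw [pv_insertBy_front _ _ _ hall]
      rw [if_pos hmem]
      simp only [List.flatMap_cons, if_pos]
      rw [pv_flatMap_congr (fun c' h => hthis c' h (Or.inr (hlt c' h)))]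
      simp
    · -- c < c0 : skip bucket c, recurse
      have hGfalse : ∀ y ∈ G c, (fun a b => decide (a.2 < b.2)) (k, c0) y = false := by
        intro y hy
        have h1 := hG c (by simp) y hy
        simp [h1]; omega
      rw [pv_insertBy_append _ _ _ _ hGfalse]
      have hmemiff : c0 ∈ c :: cs' ↔ c0 ∈ cs' := by
        constructor
        · intro h
          rcases List.mem_cons.mp h with h | h
          · omega
          · exact h
        · intro h; exact List.mem_cons.mpr (Or.inr h)
      have ihr := ih hs' (fun c' h p hp => hG c' (by simp [h]) p hp)
        (fun h => hE (fun hm => h (hmemiff.mp hm)))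
      rw [ihr]
      have hGc : (if c = c0 then G c ++ [(k, c0)] else G c) = G c := by
        have : c ≠ c0 := by omega
        simp [this]
      by_cases hm : c0 ∈ cs'
      · rw [if_pos hm, if_pos (hmemiff.mpr hm)]
        simp only [List.flatMap_cons]
        rw [hGc]
      · have hnm : c0 ∉ c :: cs' := fun h => hm (hmemiff.mp h)
        rw [if_neg hm, if_neg hnm]
        have hins : PySem.List.insertBy (fun a b => decide (a < b)) c0 (c :: cs') =
            c :: PySem.List.insertBy (fun a b => decide (a < b)) c0 cs' := by
          have : ¬ c0 < c := by omega
          simp [PySem.List.insertBy, this]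
        rw [hins]
        simp only [List.flatMap_cons]
        rw [hGc]

-- A's sorted deep list is the concatenation of the buckets over the sorted distinct counts
theorem pv_sorted_eq_flatMap (xs : List String) :
    PySem.List.sorted (xs.map (fun k => (k, pvCnt k))) (fun p => p.2) =
      (PySem.List.sorted (PySem.Set.ofList (xs.map pvCnt)) (fun c => c)).flatMap
        (fun c => (xs.filter (fun k => pvCnt k == c)).map (fun k => (k, c))) := by
  induction xs using List.reverseRecOn with
  | nil => rfl
  | append_singleton xs k ih =>
    have hmapA : (xs ++ [k]).map (fun k => (k, pvCnt k)) =
        xs.map (fun k => (k, pvCnt k)) ++ [(k, pvCnt k)] := by simp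
    have hmapC : (xs ++ [k]).map pvCnt = xs.map pvCnt ++ [pvCnt k] := by simp
    rw [hmapA, pv_sorted_append_singleton, ih, hmapC, PySem.Set.ofList_append_singleton]
    set cs := PySem.List.sorted (PySem.Set.ofList (xs.map pvCnt)) (fun c => c) with hcs
    have hpair : cs.Pairwise (· < ·) := by
      rw [hcs]; exact PySem.List.sorted_ofList_pairwise_lt _
    have hmemcs : ∀ c, c ∈ cs ↔ c ∈ PySem.Set.ofList (xs.map pvCnt) := by
      intro c
      rw [hcs, PySem.List.mem_sorted]
    have hG : ∀ c ∈ cs, ∀ p ∈ (xs.filter (fun k => pvCnt k == c)).map (fun k => (k, c)), p.2 = c := by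
      intro c _ p hp
      obtain ⟨k', _, hk'⟩ := List.mem_map.mp hp
      simp [← hk']
    have hfilnil : pvCnt k ∉ PySem.Set.ofList (xs.map pvCnt) →
        xs.filter (fun k' => pvCnt k' == pvCnt k) = [] := by
      intro hnm
      rw [List.filter_eq_nil_iff]
      intro a ha hb
      exact hnm ((PySem.Set.mem_ofList _ _).mpr (List.mem_map.mpr ⟨a, ha, by simpa using hb⟩))
    have hE : pvCnt k ∉ cs →
        (xs.filter (fun k' => pvCnt k' == pvCnt k)).map (fun k' => (k', pvCnt k)) = [] := by
      intro hnm
      rw [hfilnil (fun h => hnm ((hmemcs _).mpr h))]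
      rfl
    rw [pv_insert_flatMap k (pvCnt k) cs _ hpair hG hE]
    by_cases hm : pvCnt k ∈ PySem.Set.ofList (xs.map pvCnt)
    · have hadd : PySem.Set.add (PySem.Set.ofList (xs.map pvCnt)) (pvCnt k) =
          PySem.Set.ofList (xs.map pvCnt) := by
        simp only [PySem.Set.add, (PySem.Set.contains_iff _ _).mpr hm, if_true]
      rw [hadd, ← hcs, if_pos ((hmemcs _).mpr hm)]
      apply pv_flatMap_congr
      intro c _
      by_cases hc : c = pvCnt k
      · subst hc
        simp [List.filter_append]
      · have hkc : (pvCnt k == c) = false := by simp [Ne.symm hc]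
        simp [List.filter_append, hkc, hc]
    · have hcf : (PySem.Set.ofList (xs.map pvCnt)).contains (pvCnt k) = false := by
        rw [← Bool.not_eq_true]
        intro h
        exact hm ((PySem.Set.contains_iff _ _).mp h)
      have hadd : PySem.Set.add (PySem.Set.ofList (xs.map pvCnt)) (pvCnt k) =
          PySem.Set.ofList (xs.map pvCnt) ++ [pvCnt k] := by
        simp only [PySem.Set.add, hcf, Bool.false_eq_true, if_false]
      rw [hadd, pv_sorted_append_singleton, ← hcs, if_neg (fun h => hm ((hmemcs _).mp h))]
      apply pv_flatMap_congr
      intro c _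
      by_cases hc : c = pvCnt k
      · subst hc
        simp [List.filter_append, hfilnil hm]
      · have hkc : (pvCnt k == c) = false := by simp [Ne.symm hc]
        simp [List.filter_append, hkc, hc]

-- pvTakeRun consumes exactly a constant-count run
theorem pv_takeRun_run (c : Int) (g r : List (String × Int))
    (hg : ∀ q ∈ g, q.2 = c) (hr : ∀ q t, r = q :: t → q.2 ≠ c) :
    pvTakeRun c (g ++ r) = (g.map (·.1), r) := by
  induction g with
  | nil =>
    cases r with
    | nil => rfl
    | cons q t =>
      obtain ⟨k', c'⟩ := q
      have : c' ≠ c := hr (k', c') t rfl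
      simp [pvTakeRun, this]
  | cons p g' ih =>
    obtain ⟨k', c'⟩ := p
    have hc' : c' = c := hg (k', c') (by simp)
    simp only [List.cons_append, pvTakeRun, hc']
    rw [ih (fun q hq => hg q (by simp [hq]))]
    simp

-- pvGroups of a flatMap of nonempty strictly increasing buckets
theorem pv_groups_flatMap (cs : List Int) (H : Int → List (String × Int))
    (hs : cs.Pairwise (· < ·))
    (hH : ∀ c ∈ cs, ∀ p ∈ H c, p.2 = c)
    (hne : ∀ c ∈ cs, H c ≠ []) :
    pvGroups (cs.flatMap H) = cs.map (fun c => (H c).map (·.1)) := by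
  induction cs with
  | nil => simp [pvGroups]
  | cons c cs' ih =>
    have hlt : ∀ c' ∈ cs', c < c' := fun c' h => (List.pairwise_cons.mp hs).1 c' h
    obtain ⟨p, g, hpg⟩ : ∃ p g, H c = p :: g := by
      cases hHc : H c with
      | nil => exact absurd hHc (hne c (by simp))
      | cons p g => exact ⟨p, g, rfl⟩
    have hp2 : p.2 = c := hH c (by simp) p (by simp [hpg])
    simp only [List.flatMap_cons, hpg, List.cons_append]
    obtain ⟨k0, c0⟩ := p
    have hc0 : c0 = c := hp2
    subst hc0
    rw [pvGroups]
    have htr : pvTakeRun c0 (g ++ cs'.flatMap H) = (g.map (·.1), cs'.flatMap H) := by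
      apply pv_takeRun_run
      · intro q hq
        exact hH c0 (by simp) q (by simp [hpg, hq])
      · intro q t hqt _
        have hqmem : q ∈ cs'.flatMap H := by rw [hqt]; simp
        obtain ⟨c', hc', hq'⟩ := List.mem_flatMap.mp hqmem
        have h1 := hH c' (by simp [hc']) q hq'
        have h2 := hlt c' hc'
        omega
    rw [htr]
    simp only [List.map_cons, hpg]
    congr 1
    exact ih hs.tail (fun c' h p hp => hH c' (by simp [h]) p hp)
      (fun c' h => hne c' (by simp [h]))

-- the bucket pairs of B's fold as a plain filter
theorem pv_filter_map_pair (xs : List String) (c : Int) :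
    ((xs.map (fun k => (pvCnt k, k))).filter (fun p => p.1 == c)).map (·.2) =
      xs.filter (fun k => pvCnt k == c) := by
  induction xs with
  | nil => rfl
  | cons a t ih =>
    simp only [List.map_cons, List.filter_cons]
    by_cases h : (pvCnt a == c) = true <;> simp [h, ih]

-- B's bucket dict: its lookups and its keys
theorem pv_buckets_getD (xs : List String) (c : Int) :
    (xs.foldl (fun d k => d.modify (pvCnt k) [] (fun l => l ++ [k])) PySem.Dict.empty).getD c [] =
      xs.filter (fun k => pvCnt k == c) := by
  have h1 : xs.foldl (fun d k => d.modify (pvCnt k) [] (fun l => l ++ [k])) PySem.Dict.empty =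
      (xs.map (fun k => (pvCnt k, k))).foldl
        (fun d p => d.modify p.1 [] (fun l => l ++ [p.2])) PySem.Dict.empty := by
    rw [List.foldl_map]
  have he : (PySem.Dict.empty : PySem.Dict Int (List String)).getD c [] = [] := rfl
  rw [h1, PySem.Dict.getD_foldl_modify_append, he, List.nil_append]
  exact pv_filter_map_pair xs c

theorem pv_buckets_keys (xs : List String) :
    (xs.foldl (fun d k => d.modify (pvCnt k) [] (fun l => l ++ [k])) PySem.Dict.empty).keys =
      PySem.Set.ofList (xs.map pvCnt) := by
  rw [PySem.Dict.keys_foldl_modify_key]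
  simp [PySem.Set.update_nil_left]

-- ===== VERDICT (by name: the statement is the Claim_ definition above) =====
theorem sort_by_depth_spec : Claim_equal_sort_by_depth := by
  intro xs _
  show sort_by_depth xs = sort_by_depth_alt xs
  have hA : sort_by_depth xs =
      pvGroups (PySem.List.sorted (xs.map (fun k => (k, pvCnt k))) (fun p => p.2)) := rfl
  have hB : sort_by_depth_alt xs =
      (PySem.List.sorted
          ((xs.foldl (fun d k => d.modify (pvCnt k) [] (fun l => l ++ [k])) PySem.Dict.empty).keys)
          (fun c => c)).map
        (fun c => (xs.foldl (fun d k => d.modify (pvCnt k) [] (fun l => l ++ [k])) PySem.Dict.empty).getD c []) := rfl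
  rw [hA, hB, pv_buckets_keys, pv_sorted_eq_flatMap]
  set cs := PySem.List.sorted (PySem.Set.ofList (xs.map pvCnt)) (fun c => c) with hcs
  have hpair : cs.Pairwise (· < ·) := by
    rw [hcs]; exact PySem.List.sorted_ofList_pairwise_lt _
  have hH : ∀ c ∈ cs, ∀ p ∈ (xs.filter (fun k => pvCnt k == c)).map (fun k => (k, c)), p.2 = c := by
    intro c _ p hp
    obtain ⟨k', _, hk'⟩ := List.mem_map.mp hp
    simp [← hk']
  have hne : ∀ c ∈ cs, (xs.filter (fun k => pvCnt k == c)).map (fun k => (k, c)) ≠ [] := by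
    intro c hc
    have hmem : c ∈ PySem.Set.ofList (xs.map pvCnt) := by
      rw [hcs] at hc
      exact (PySem.List.mem_sorted _ _ _ _).mp hc
    obtain ⟨k', hk', hck⟩ := List.mem_map.mp ((PySem.Set.mem_ofList _ _).mp hmem)
    intro hnil
    have hkf : k' ∈ xs.filter (fun k => pvCnt k == c) := List.mem_filter.mpr ⟨hk', by simp [hck]⟩
    rw [List.map_eq_nil_iff.mp hnil] at hkf
    simp at hkf
  rw [pv_groups_flatMap cs _ hpair hH hne]
  apply List.map_congr_left
  intro c _
  rw [pv_buckets_getD, List.map_map]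
  simp [Function.comp_def]
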